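-- pv_equiv track=rewrite | github.com/cyaxios/tn-proto | python/tn/_agents_policy.py | _split_field_sections
-- ===== SOURCE A (Python) =====
-- def _split_field_sections(section_body: str) -> dict[str, str]:
--     """Split one event-type section on ``### `` subheadings."""
--     out: dict[str, str] = {}
--     cur: str | None = None
--     cur_lines: list[str] = []
--     for ln in section_body.splitlines():
--         if ln.startswith("### "):
--             if cur is not None:
--                 out[cur] = "\n".join(cur_lines).strip()
--             cur = ln[4:].strip()
--             cur_lines = []
--         else:
--             cur_lines.append(ln)
--     if cur is not None:
--         out[cur] = "\n".join(cur_lines).strip()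
--     return out
-- ===== SOURCE B (Python) =====
-- def _split_field_sections(section_body: str) -> dict[str, str]:
--     """Split one event-type section on ``### `` subheadings.
--
--     One pass over the heading positions: each subheading's body is the slice
--     of lines up to the next subheading; dict() applies last-wins overwrite.
--     """
--     lines = section_body.splitlines()
--     n = len(lines)
--     pairs = []
--     i = 0
--     while i < n and not lines[i].startswith("### "):
--         i += 1
--     while i < n:
--         j = i + 1
--         while j < n and not lines[j].startswith("### "):
--             j += 1
--         pairs.append((lines[i][4:].strip(), "\n".join(lines[i + 1:j]).strip()))
--         i = j
--     return dict(pairs)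
-- ===== Notes on version B (the rewrite author's own statement) =====
-- stated objective: alternative
-- what changed: Replaces A's running state machine (current title + accumulated lines + deferred flush at each heading and at EOF) with a span scan: skip the prologue, then for each heading take the slice of lines up to the next heading, collect (title, body) pairs and build the dict once with dict(pairs).
import Mathlib
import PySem

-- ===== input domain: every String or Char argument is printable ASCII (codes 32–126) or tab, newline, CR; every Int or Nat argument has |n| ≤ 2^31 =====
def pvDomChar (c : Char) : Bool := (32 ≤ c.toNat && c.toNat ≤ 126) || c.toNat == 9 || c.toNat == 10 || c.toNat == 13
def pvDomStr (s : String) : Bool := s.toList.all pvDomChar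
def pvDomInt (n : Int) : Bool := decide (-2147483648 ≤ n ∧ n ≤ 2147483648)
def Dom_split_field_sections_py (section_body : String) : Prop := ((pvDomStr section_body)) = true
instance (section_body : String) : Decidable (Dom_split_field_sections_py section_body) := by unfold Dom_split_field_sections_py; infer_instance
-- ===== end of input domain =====

-- B differs from A only in decomposition (span scan + dict(pairs) vs running state machine); return values agree everywhere.

-- ===== PORT A =====
-- state machine: out dict, current title (None before the first heading), accumulated lines; flush at each heading and at EOF
def splitA_go (out : PySem.Dict String String) (cur : Option String)
    (curLines : List String) : List String → PySem.Dict String String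
  | [] =>
      match cur with
      | some c => out.insert c (PySem.Str.strip (PySem.Str.join "\n" curLines))
      | none => out
  | ln :: ls =>
      if PySem.Str.startswith ln "### " then
        let out' :=
          match cur with
          | some c => out.insert c (PySem.Str.strip (PySem.Str.join "\n" curLines))
          | none => out
        splitA_go out' (some (PySem.Str.strip (PySem.Str.slice ln (some 4) none))) [] ls
      else
        splitA_go out cur (curLines ++ [ln]) ls

def split_field_sections_py (section_body : String) : List (String × String) :=
  (splitA_go PySem.Dict.empty none [] (PySem.Str.splitlines section_body)).items

-- ===== PORT B =====
-- span scan: lines[i] is a heading; the body is the span of lines up to the next heading (the inner `while j` scan)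
def splitB_go : List String → List (String × String)
  | [] => []
  | ln :: ls =>
      (PySem.Str.strip (PySem.Str.slice ln (some 4) none),
        PySem.Str.strip (PySem.Str.join "\n"
          (ls.takeWhile (fun l => !PySem.Str.startswith l "### ")))) ::
        splitB_go (ls.dropWhile (fun l => !PySem.Str.startswith l "### "))
  termination_by ls => ls.length
  decreasing_by
    exact Nat.lt_succ_of_le (List.length_dropWhile_le _ _)

def split_field_sections_py_alt (section_body : String) : List (String × String) :=
  -- the initial `while i` skip loop, then dict(pairs)
  let lines := PySem.Str.splitlines section_body
  ((splitB_go (lines.dropWhile (fun l => !PySem.Str.startswith l "### "))).foldl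
      (fun d p => d.insert p.1 p.2) PySem.Dict.empty).items

-- ===== PRECONDITION & SPEC =====
def Spec_split_field_sections_py (section_body : String) (out : List (String × String)) : Prop := out = split_field_sections_py_alt section_body
instance (section_body : String) (out : List (String × String)) : Decidable (Spec_split_field_sections_py section_body out) := by unfold Spec_split_field_sections_py; infer_instance

-- ===== CLAIM (what is proved, stated in full; the proofs are below) =====
def Claim_equal_split_field_sections_py : Prop := ∀ (section_body : String), Dom_split_field_sections_py section_body → Spec_split_field_sections_py section_body (split_field_sections_py section_body)

-- ===== LEMMAS AND PROOFS =====

-- with an open section (cur = some c), A's remaining run inserts (c, body-so-far ++ span) and then behaves like B's group list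
theorem splitA_go_some (ls : List String) : ∀ (out : PySem.Dict String String) (c : String)
    (acc : List String),
    splitA_go out (some c) acc ls =
      (((c, PySem.Str.strip (PySem.Str.join "\n"
          (acc ++ ls.takeWhile (fun l => !PySem.Str.startswith l "### ")))) ::
        splitB_go (ls.dropWhile (fun l => !PySem.Str.startswith l "### "))).foldl
        (fun d p => d.insert p.1 p.2) out) := by
  induction ls with
  | nil =>
      intro out c acc
      simp [splitA_go, splitB_go]
  | cons ln ls ih =>
      intro out c acc
      by_cases h : PySem.Str.startswith ln "### " = true
      · rw [splitA_go, if_pos h, ih]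
        simp only [List.takeWhile_cons, List.dropWhile_cons, h, Bool.not_true]
        conv_rhs => rw [splitB_go.eq_def]
        simp
      · have hb : PySem.Str.startswith ln "### " = false := by
          cases hx : PySem.Str.startswith ln "### " with
          | false => rfl
          | true => exact absurd hx h
        rw [splitA_go, if_neg h, ih]
        simp only [List.takeWhile_cons, List.dropWhile_cons, hb, Bool.not_false, reduceIte]
        simp

-- before the first heading (cur = none) A only skips lines; the accumulated list is dead state
theorem splitA_go_none (ls : List String) : ∀ (out : PySem.Dict String String)
    (acc : List String),
    splitA_go out none acc ls =
      ((splitB_go (ls.dropWhile (fun l => !PySem.Str.startswith l "### "))).foldl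
        (fun d p => d.insert p.1 p.2) out) := by
  induction ls with
  | nil =>
      intro out acc
      simp [splitA_go, splitB_go]
  | cons ln ls ih =>
      intro out acc
      by_cases h : PySem.Str.startswith ln "### " = true
      · rw [splitA_go, if_pos h, splitA_go_some]
        simp only [List.dropWhile_cons, h, Bool.not_true]
        conv_rhs => rw [splitB_go.eq_def]
        simp
      · have hb : PySem.Str.startswith ln "### " = false := by
          cases hx : PySem.Str.startswith ln "### " with
          | false => rfl
          | true => exact absurd hx h
        rw [splitA_go, if_neg h, ih]
        simp only [List.dropWhile_cons, hb, Bool.not_false, reduceIte]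

-- ===== VERDICT (by name: the statement is the Claim_ definition above) =====
theorem split_field_sections_py_spec : Claim_equal_split_field_sections_py := by
  intro s _
  unfold Spec_split_field_sections_py split_field_sections_py split_field_sections_py_alt
  rw [splitA_go_none]
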